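-- pv_equiv track=rewrite | github.com/supernova1963/eedc-homeassistant | backend/api/routes/custom_import.py | _auto_detect_mapping
-- ===== SOURCE A (Python) =====
-- def _auto_detect_mapping(headers: list[str]) -> dict[str, str]:
--     """Versucht automatisch Spalten auf EEDC-Felder zu mappen."""
--     mapping: dict[str, str] = {}
--
--     # Normalisierte Header für Matching
--     header_lower = {h: h.lower().replace(" ", "_").replace("-", "_") for h in headers}
--
--     patterns: dict[str, list[str]] = {
--         "jahr": ["jahr", "year", "date_year"],
--         "monat": ["monat", "month", "date_month"],
--         "pv_erzeugung_kwh": ["pv_erzeugung", "pv_ertrag", "erzeugung", "yield", "production", "generation", "pv_kwh", "pv_erzeugung_kwh"],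
--         "einspeisung_kwh": ["einspeisung", "feed_in", "export", "grid_export", "einspeisung_kwh"],
--         "netzbezug_kwh": ["netzbezug", "grid_import", "bezug", "consumption_grid", "netzbezug_kwh", "buy"],
--         "eigenverbrauch_kwh": ["eigenverbrauch", "self_consumption", "direct_use", "eigenverbrauch_kwh"],
--         "batterie_ladung_kwh": ["batterie_ladung", "battery_charge", "bat_charge", "ladung", "batterie_ladung_kwh", "charge"],
--         "batterie_entladung_kwh": ["batterie_entladung", "battery_discharge", "bat_discharge", "entladung", "batterie_entladung_kwh", "discharge"],
--         "wallbox_ladung_kwh": ["wallbox_ladung", "wallbox", "ev_charge", "wallbox_ladung_kwh"],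
--         "eauto_km_gefahren": ["km_gefahren", "km", "mileage", "distance", "eauto_km"],
--     }
--
--     used_headers: set[str] = set()
--     for eedc_feld, keywords in patterns.items():
--         for header in headers:
--             if header in used_headers:
--                 continue
--             normalized = header_lower[header]
--             for keyword in keywords:
--                 if keyword == normalized or keyword in normalized:
--                     mapping[header] = eedc_feld
--                     used_headers.add(header)
--                     break
--             if header in mapping:
--                 break
--
--     return mapping
-- ===== SOURCE B (Python) =====
-- _PATTERNS = [
--     ("jahr", ["jahr", "year", "date_year"]),
--     ("monat", ["monat", "month", "date_month"]),
--     ("pv_erzeugung_kwh", ["pv_erzeugung", "pv_ertrag", "erzeugung", "yield", "production", "generation", "pv_kwh", "pv_erzeugung_kwh"]),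
--     ("einspeisung_kwh", ["einspeisung", "feed_in", "export", "grid_export", "einspeisung_kwh"]),
--     ("netzbezug_kwh", ["netzbezug", "grid_import", "bezug", "consumption_grid", "netzbezug_kwh", "buy"]),
--     ("eigenverbrauch_kwh", ["eigenverbrauch", "self_consumption", "direct_use", "eigenverbrauch_kwh"]),
--     ("batterie_ladung_kwh", ["batterie_ladung", "battery_charge", "bat_charge", "ladung", "batterie_ladung_kwh", "charge"]),
--     ("batterie_entladung_kwh", ["batterie_entladung", "battery_discharge", "bat_discharge", "entladung", "batterie_entladung_kwh", "discharge"]),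
--     ("wallbox_ladung_kwh", ["wallbox_ladung", "wallbox", "ev_charge", "wallbox_ladung_kwh"]),
--     ("eauto_km_gefahren", ["km_gefahren", "km", "mileage", "distance", "eauto_km"]),
-- ]
--
--
-- def _auto_detect_mapping(headers: list[str]) -> dict[str, str]:
--     """Two-phase variant: build per-field candidate lists first, then greedily assign."""
--     pairs = [(h, h.lower().replace(" ", "_").replace("-", "_")) for h in headers]
--     candidates = [
--         (field, [h for h, n in pairs if any(kw in n for kw in kws)])
--         for field, kws in _PATTERNS
--     ]
--     mapping: dict[str, str] = {}
--     used: set[str] = set()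
--     for field, cand in candidates:
--         for h in cand:
--             if h not in used:
--                 mapping[h] = field
--                 used.add(h)
--                 break
--     return mapping
-- ===== Notes on version B (the rewrite author's own statement) =====
-- stated objective: alternative
-- what changed: Replaces A's interleaved triple-nested loop (and its header_lower dict plus redundant equality-or-substring test) with a two-phase algorithm: first a matching phase building per-field candidate header lists from precomputed (header, normalized) pairs, then a separate greedy assignment pass that takes each field's first unused candidate.
import Mathlib
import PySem

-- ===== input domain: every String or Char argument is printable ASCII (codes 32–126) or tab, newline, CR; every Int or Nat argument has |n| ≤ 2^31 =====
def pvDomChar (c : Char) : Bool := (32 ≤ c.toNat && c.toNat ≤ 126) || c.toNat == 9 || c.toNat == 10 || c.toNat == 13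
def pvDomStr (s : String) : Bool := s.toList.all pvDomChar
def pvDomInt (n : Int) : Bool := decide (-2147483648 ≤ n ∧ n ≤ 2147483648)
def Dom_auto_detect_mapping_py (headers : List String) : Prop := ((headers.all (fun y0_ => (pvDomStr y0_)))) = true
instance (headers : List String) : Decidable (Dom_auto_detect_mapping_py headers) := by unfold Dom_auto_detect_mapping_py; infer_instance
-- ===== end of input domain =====

-- B replaces A's interleaved triple-nested loop with a two-phase algorithm (candidate lists, then
-- greedy assignment); objective: alternative decomposition, same asymptotic cost.

-- ===== PORT A =====

-- the `patterns` dict literal (insertion order)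
def pvPatterns : List (String × List String) :=
  [("jahr", ["jahr", "year", "date_year"]),
   ("monat", ["monat", "month", "date_month"]),
   ("pv_erzeugung_kwh", ["pv_erzeugung", "pv_ertrag", "erzeugung", "yield", "production", "generation", "pv_kwh", "pv_erzeugung_kwh"]),
   ("einspeisung_kwh", ["einspeisung", "feed_in", "export", "grid_export", "einspeisung_kwh"]),
   ("netzbezug_kwh", ["netzbezug", "grid_import", "bezug", "consumption_grid", "netzbezug_kwh", "buy"]),
   ("eigenverbrauch_kwh", ["eigenverbrauch", "self_consumption", "direct_use", "eigenverbrauch_kwh"]),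
   ("batterie_ladung_kwh", ["batterie_ladung", "battery_charge", "bat_charge", "ladung", "batterie_ladung_kwh", "charge"]),
   ("batterie_entladung_kwh", ["batterie_entladung", "battery_discharge", "bat_discharge", "entladung", "batterie_entladung_kwh", "discharge"]),
   ("wallbox_ladung_kwh", ["wallbox_ladung", "wallbox", "ev_charge", "wallbox_ladung_kwh"]),
   ("eauto_km_gefahren", ["km_gefahren", "km", "mileage", "distance", "eauto_km"])]

-- h.lower().replace(" ", "_").replace("-", "_")
def pvNorm (h : String) : String :=
  PySem.Str.replace (PySem.Str.replace (PySem.Str.lower h) " " "_") "-" "_"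

-- header_lower = {h: h.lower()... for h in headers}
def pvHeaderLower (headers : List String) : PySem.Dict String String :=
  headers.foldl (fun d h => d.insert h (pvNorm h)) PySem.Dict.empty

-- the innermost `for keyword in keywords` loop: True iff some keyword fires (first hit breaks;
-- the assignment it guards is performed by the caller, which is observationally identical)
def pvKwHit : List String → String → Bool
  | [], _ => false
  | k :: ks, n => if k == n || PySem.Str.isIn k n then true else pvKwHit ks n

-- the `for header in headers` loop body for one eedc_feld, with `continue` and the two `break`s.
-- `header_lower[header]` is a lookup on a key that is always present (h ∈ headers); the `.getD ""`
-- default is never used — exact on every input this file claims.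
def pvInnerA (hl : PySem.Dict String String) (feld : String) (kws : List String) :
    List String → PySem.Dict String String → PySem.Set String →
    PySem.Dict String String × PySem.Set String
  | [], m, u => (m, u)
  | h :: t, m, u =>
    if u.contains h then pvInnerA hl feld kws t m u
    else
      let n := (hl.get? h).getD ""
      if pvKwHit kws n then
        let m' := m.insert h feld
        let u' := u.add h
        if (m'.get? h).isSome then (m', u') else pvInnerA hl feld kws t m' u'
      else
        if (m.get? h).isSome then (m, u) else pvInnerA hl feld kws t m u

def auto_detect_mapping_py (headers : List String) : List (String × String) :=
  let hl := pvHeaderLower headers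
  (pvPatterns.foldl
    (fun (st : PySem.Dict String String × PySem.Set String) p =>
      pvInnerA hl p.1 p.2 headers st.1 st.2)
    (PySem.Dict.empty, PySem.Set.empty)).1.items

-- ===== PORT B =====

-- any(kw in n for kw in kws)
def pvMatches (kws : List String) (n : String) : Bool :=
  kws.any (fun kw => PySem.Str.isIn kw n)

-- for h in cand: if h not in used: mapping[h] = field; used.add(h); break
def pvAssignFirst (feld : String) :
    List String → PySem.Dict String String → PySem.Set String →
    PySem.Dict String String × PySem.Set String
  | [], m, u => (m, u)
  | h :: t, m, u =>
    if u.contains h then pvAssignFirst feld t m u else (m.insert h feld, u.add h)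

def auto_detect_mapping_py_alt (headers : List String) : List (String × String) :=
  let pairs := headers.map (fun h => (h, pvNorm h))
  let candidates := pvPatterns.map
    (fun p => (p.1, (pairs.filter (fun q => pvMatches p.2 q.2)).map Prod.fst))
  (candidates.foldl
    (fun (st : PySem.Dict String String × PySem.Set String) c =>
      pvAssignFirst c.1 c.2 st.1 st.2)
    (PySem.Dict.empty, PySem.Set.empty)).1.items

-- ===== PRECONDITION & SPEC =====
def Spec_auto_detect_mapping_py (headers : List String) (out : List (String × String)) : Prop := out = auto_detect_mapping_py_alt headers
instance (headers : List String) (out : List (String × String)) : Decidable (Spec_auto_detect_mapping_py headers out) := by unfold Spec_auto_detect_mapping_py; infer_instance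

-- ===== CLAIM (what is proved, stated in full; the proofs are below) =====
def Claim_equal_auto_detect_mapping_py : Prop := ∀ (headers : List String), Dom_auto_detect_mapping_py headers → Spec_auto_detect_mapping_py headers (auto_detect_mapping_py headers)

-- ===== LEMMAS AND PROOFS =====

-- the states reached keep dict keys inside the used-set
def pvInv (m : PySem.Dict String String) (u : PySem.Set String) : Prop :=
  ∀ h, (m.get? h).isSome → u.contains h = true

lemma pvHeaderLower_get?_of_not_mem (hs : List String) (d : PySem.Dict String String)
    (h : String) (hh : h ∉ hs) :
    (hs.foldl (fun d h => d.insert h (pvNorm h)) d).get? h = d.get? h := by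
  induction hs generalizing d with
  | nil => rfl
  | cons a t ih =>
    simp only [List.mem_cons, not_or] at hh
    simp only [List.foldl_cons]
    rw [ih _ hh.2, PySem.Dict.get?_insert_of_ne _ _ hh.1]

lemma pvHeaderLower_get? (hs : List String) (d : PySem.Dict String String)
    (h : String) (hh : h ∈ hs) :
    (hs.foldl (fun d h => d.insert h (pvNorm h)) d).get? h = some (pvNorm h) := by
  induction hs generalizing d with
  | nil => cases hh
  | cons a t ih =>
    simp only [List.foldl_cons]
    by_cases ht : h ∈ t
    · exact ih _ ht
    · rcases List.mem_cons.mp hh with rfl | hh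
      · rw [pvHeaderLower_get?_of_not_mem _ _ _ ht, PySem.Dict.get?_insert_self]
      · exact absurd hh ht

lemma pvKwHit_eq (kws : List String) (n : String) : pvKwHit kws n = pvMatches kws n := by
  induction kws with
  | nil => rfl
  | cons k ks ih =>
    simp only [pvKwHit, pvMatches, List.any_cons]
    simp only [pvMatches] at ih
    by_cases hk : (k == n || PySem.Str.isIn k n) = true
    · rw [if_pos hk]
      have hin : PySem.Str.isIn k n = true := by
        rcases Bool.or_eq_true_iff.mp hk with h | h
        · have : k = n := by simpa using h
          subst this
          exact (PySem.Str.isIn_iff_infix k k).mpr (List.infix_refl _)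
        · exact h
      rw [hin, Bool.true_or]
    · rw [if_neg hk]
      have hin : PySem.Str.isIn k n = false := by
        cases h : PySem.Str.isIn k n
        · rfl
        · exact absurd (Bool.or_eq_true_iff.mpr (Or.inr h)) hk
      rw [hin, Bool.false_or]
      exact ih

lemma pvHeaderLower_get?' (headers : List String) (h : String) (hh : h ∈ headers) :
    (pvHeaderLower headers).get? h = some (pvNorm h) :=
  pvHeaderLower_get? headers PySem.Dict.empty h hh

lemma pvAssignFirst_inv (feld : String) (hs : List String)
    (m : PySem.Dict String String) (u : PySem.Set String) (hinv : pvInv m u) :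
    pvInv (pvAssignFirst feld hs m u).1 (pvAssignFirst feld hs m u).2 := by
  induction hs generalizing m u with
  | nil => exact hinv
  | cons h t ih =>
    simp only [pvAssignFirst]
    by_cases hc : u.contains h = true
    · rw [if_pos hc]; exact ih _ _ hinv
    · rw [if_neg hc]
      intro x hx
      rw [PySem.Set.contains_iff]
      rw [PySem.Set.mem_add]
      by_cases hxh : x = h
      · exact Or.inr hxh
      · left
        rw [PySem.Dict.get?_insert_of_ne _ _ hxh] at hx
        exact (PySem.Set.contains_iff u x).mp (hinv x hx)

-- the inner header loop of A equals: filter the matching headers, then assign the first unused one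
lemma pvInnerA_eq (hl : PySem.Dict String String) (feld : String) (kws : List String)
    (hs : List String) (m : PySem.Dict String String) (u : PySem.Set String)
    (hinv : pvInv m u) (hhl : ∀ h ∈ hs, hl.get? h = some (pvNorm h)) :
    pvInnerA hl feld kws hs m u =
      pvAssignFirst feld
        (((hs.map (fun h => (h, pvNorm h))).filter (fun q => pvMatches kws q.2)).map Prod.fst)
        m u := by
  induction hs generalizing m u with
  | nil => rfl
  | cons h t ih =>
    have hhlh := hhl h (List.mem_cons_self ..)
    have hhlt : ∀ x ∈ t, hl.get? x = some (pvNorm x) := fun x hx => hhl x (List.mem_cons_of_mem _ hx)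
    simp only [pvInnerA, List.map_cons, List.filter_cons, hhlh, Option.getD_some, pvKwHit_eq]
    by_cases hc : u.contains h = true
    · rw [if_pos hc]
      by_cases hm : pvMatches kws (pvNorm h) = true
      · simp only [hm, if_pos, pvAssignFirst, List.map_cons, hc]
        exact ih _ _ hinv hhlt
      · simp only [Bool.not_eq_true] at hm
        simp only [hm, Bool.false_eq_true, if_false]
        exact ih _ _ hinv hhlt
    · rw [if_neg hc]
      by_cases hm : pvMatches kws (pvNorm h) = true
      · simp only [hm, if_pos, PySem.Dict.get?_insert_self, Option.isSome_some,
          pvAssignFirst, List.map_cons]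
        rw [if_neg hc]
      · simp only [Bool.not_eq_true] at hm
        simp only [hm, Bool.false_eq_true, if_false]
        have hnone : (m.get? h).isSome = false := by
          cases hget : (m.get? h).isSome
          · rfl
          · exact absurd (hinv h hget) hc
        simp only [hnone, Bool.false_eq_true, if_false]
        exact ih _ _ hinv hhlt

-- the outer loop over patterns, state generalised
lemma pvOuter_eq (headers : List String) (ps : List (String × List String))
    (m : PySem.Dict String String) (u : PySem.Set String) (hinv : pvInv m u) :
    ps.foldl (fun (st : PySem.Dict String String × PySem.Set String) p =>
        pvInnerA (pvHeaderLower headers) p.1 p.2 headers st.1 st.2) (m, u) =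
    (ps.map (fun p => (p.1,
        ((headers.map (fun h => (h, pvNorm h))).filter
          (fun q => pvMatches p.2 q.2)).map Prod.fst))).foldl
      (fun (st : PySem.Dict String String × PySem.Set String) c =>
        pvAssignFirst c.1 c.2 st.1 st.2) (m, u) := by
  induction ps generalizing m u with
  | nil => rfl
  | cons p ps ih =>
    simp only [List.foldl_cons, List.map_cons]
    rw [pvInnerA_eq _ _ _ _ _ _ hinv (fun h hh => pvHeaderLower_get?' headers h hh)]
    exact ih _ _ (pvAssignFirst_inv _ _ _ _ hinv)

-- ===== VERDICT (by name: the statement is the Claim_ definition above) =====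
theorem auto_detect_mapping_py_spec : Claim_equal_auto_detect_mapping_py := by
  intro headers _
  show auto_detect_mapping_py headers = auto_detect_mapping_py_alt headers
  have hinv : pvInv PySem.Dict.empty PySem.Set.empty := by
    intro h hh
    simp [PySem.Dict.get?_empty] at hh
  unfold auto_detect_mapping_py auto_detect_mapping_py_alt
  dsimp only
  exact congrArg (fun st => st.1.items) (pvOuter_eq headers pvPatterns _ _ hinv)
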